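-- pv_equiv track=rewrite | github.com/emrahcakan/udp-loss-analyzer | compare_udp.py | trim_to_overlap
-- ===== SOURCE A (Python) =====
-- def trim_to_overlap(tx, rx):
--     """
--     Find the overlapping window by payload, then slice both lists.
--     tx, rx are lists of (payload, timestamp).
--     Returns:
--       tx_trim, rx_trim,
--       (first_tx, last_tx),  # indices in original tx
--       (first_rx, last_rx)   # indices in original rx
--     """
--     tx_payloads = [p for p,_ in tx]
--     rx_payloads = [p for p,_ in rx]
--     common = set(tx_payloads) & set(rx_payloads)
--     if not common:
--         raise RuntimeError("No overlapping packets between TX and RX!")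
--
--     first_tx = next(i for i, (p,_) in enumerate(tx) if p in common)
--     last_tx  = max(i for i, (p,_) in enumerate(tx) if p in common)
--     first_rx = next(i for i, (p,_) in enumerate(rx) if p in common)
--     last_rx  = max(i for i, (p,_) in enumerate(rx) if p in common)
--
--     return (
--         tx[first_tx:last_tx+1],
--         rx[first_rx:last_rx+1],
--         (first_tx, last_tx),
--         (first_rx, last_rx)
--     )
-- ===== SOURCE B (Python) =====
-- def trim_to_overlap(tx, rx):
--     """No intersection set is built: each list's boundaries are found by
--     membership in the OTHER list's payload set, scanning from the front for
--     the first index and from the back (early exit) for the last."""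
--     tx_keys = {p for p, _ in tx}
--     rx_keys = {p for p, _ in rx}
--
--     def window(pkts, keys):
--         n = len(pkts)
--         first = 0
--         while first < n and pkts[first][0] not in keys:
--             first += 1
--         if first == n:
--             raise RuntimeError("No overlapping packets between TX and RX!")
--         last = n - 1
--         while pkts[last][0] not in keys:
--             last -= 1
--         return first, last
--
--     first_tx, last_tx = window(tx, rx_keys)
--     first_rx, last_rx = window(rx, tx_keys)
--     return (
--         tx[first_tx:last_tx+1],
--         rx[first_rx:last_rx+1],
--         (first_tx, last_tx),
--         (first_rx, last_rx)
--     )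
-- ===== Notes on version B (the rewrite author's own statement) =====
-- stated objective: alternative
-- what changed: B builds no intersection set: each list's window is found by membership in the other list's payload set, with a front-to-back scan for the first index and a back-to-front early-exit scan for the last, instead of A's intersection plus full 'next'/'max' generator passes.
import Mathlib
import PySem

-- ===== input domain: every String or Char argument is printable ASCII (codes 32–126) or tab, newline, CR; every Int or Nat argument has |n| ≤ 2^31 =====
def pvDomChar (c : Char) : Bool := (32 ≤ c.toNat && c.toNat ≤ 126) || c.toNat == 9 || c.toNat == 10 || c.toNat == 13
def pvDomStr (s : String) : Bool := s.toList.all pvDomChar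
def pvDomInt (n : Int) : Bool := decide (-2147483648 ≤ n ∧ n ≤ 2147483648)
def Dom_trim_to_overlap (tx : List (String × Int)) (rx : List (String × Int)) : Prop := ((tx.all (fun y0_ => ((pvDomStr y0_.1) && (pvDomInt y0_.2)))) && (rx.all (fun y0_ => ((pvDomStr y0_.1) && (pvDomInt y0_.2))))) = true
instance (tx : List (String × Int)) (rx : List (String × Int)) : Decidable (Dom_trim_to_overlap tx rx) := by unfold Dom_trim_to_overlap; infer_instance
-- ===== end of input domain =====

-- B builds no intersection set and no max pass: each list's window comes from membership in the
-- OTHER list's payload set, a forward scan for the first index and a backward scan for the last;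
-- return value proved equal wherever A returns (Pre_ excludes the no-overlap RuntimeError case).

-- ===== PORT A =====
def trim_to_overlap (tx : List (String × Int)) (rx : List (String × Int)) : (List (String × Int)) × (List (String × Int)) × (Int × Int) × (Int × Int) :=
  let tx_payloads := tx.map (fun pt => pt.1)
  let rx_payloads := rx.map (fun pt => pt.1)
  let common : PySem.Set String := PySem.Set.inter (PySem.Set.ofList tx_payloads) (PySem.Set.ofList rx_payloads)
  -- next(i for i,(p,_) in enumerate(l) if p in common)  — first match (raises outside Pre_; getD 0 is unreachable there)
  let first_tx : Int := (((PySem.List.enumerate tx 0).find? (fun ip => PySem.Set.contains common ip.2.1)).map (fun ip => ip.1)).getD 0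
  -- max(i for i,(p,_) in enumerate(l) if p in common)
  let last_tx : Int := (PySem.List.max? (((PySem.List.enumerate tx 0).filter (fun ip => PySem.Set.contains common ip.2.1)).map (fun ip => ip.1)) (fun i => i)).getD 0
  let first_rx : Int := (((PySem.List.enumerate rx 0).find? (fun ip => PySem.Set.contains common ip.2.1)).map (fun ip => ip.1)).getD 0
  let last_rx : Int := (PySem.List.max? (((PySem.List.enumerate rx 0).filter (fun ip => PySem.Set.contains common ip.2.1)).map (fun ip => ip.1)) (fun i => i)).getD 0
  (PySem.List.slice tx (some first_tx) (some (last_tx + 1)),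
   PySem.List.slice rx (some first_rx) (some (last_rx + 1)),
   (first_tx, last_tx), (first_rx, last_rx))

-- ===== PORT B =====
-- forward scan: index of the first element whose payload is in keys (the 'while first < n and … not in keys' loop)
def pvFirstIdx (keys : PySem.Set String) (pkts : List (String × Int)) (i : Int) : Option Int :=
  match pkts with
  | [] => none
  | x :: t => if PySem.Set.contains keys x.1 then some i else pvFirstIdx keys t (i + 1)

-- backward scan: called on the REVERSED list with start index n-1 (the 'while … not in keys: last -= 1' loop)
def pvLastIdx (keys : PySem.Set String) (pkts : List (String × Int)) (i : Int) : Option Int :=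
  match pkts with
  | [] => none
  | x :: t => if PySem.Set.contains keys x.1 then some i else pvLastIdx keys t (i - 1)

def trim_to_overlap_alt (tx : List (String × Int)) (rx : List (String × Int)) : (List (String × Int)) × (List (String × Int)) × (Int × Int) × (Int × Int) :=
  let tx_keys : PySem.Set String := PySem.Set.ofList (tx.map (fun pt => pt.1))
  let rx_keys : PySem.Set String := PySem.Set.ofList (rx.map (fun pt => pt.1))
  match pvFirstIdx rx_keys tx 0, pvLastIdx rx_keys tx.reverse ((tx.length : Int) - 1),
        pvFirstIdx tx_keys rx 0, pvLastIdx tx_keys rx.reverse ((rx.length : Int) - 1) with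
  | some ft, some lt, some fr, some lr =>
      (PySem.List.slice tx (some ft) (some (lt + 1)),
       PySem.List.slice rx (some fr) (some (lr + 1)),
       (ft, lt), (fr, lr))
  | _, _, _, _ => ([], [], (0, 0), (0, 0))   -- unreachable under Pre_ (the RuntimeError branch)

-- ===== PRECONDITION & SPEC =====
-- Pre_ excludes exactly the inputs with no shared payload, on which A raises RuntimeError.
def Pre_trim_to_overlap (tx : List (String × Int)) (rx : List (String × Int)) : Prop :=
  tx.any (fun pt => (rx.map (fun qt => qt.1)).contains pt.1) = true
instance (tx : List (String × Int)) (rx : List (String × Int)) : Decidable (Pre_trim_to_overlap tx rx) := by unfold Pre_trim_to_overlap; infer_instance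

def pvWitness_trim_to_overlap : (List (String × Int)) × (List (String × Int)) :=
  ([("a", 1), ("b", 2)], [("b", 5), ("c", 6)])

def Spec_trim_to_overlap (tx : List (String × Int)) (rx : List (String × Int)) (out : (List (String × Int)) × (List (String × Int)) × (Int × Int) × (Int × Int)) : Prop := out = trim_to_overlap_alt tx rx
instance (tx : List (String × Int)) (rx : List (String × Int)) (out : (List (String × Int)) × (List (String × Int)) × (Int × Int) × (Int × Int)) : Decidable (Spec_trim_to_overlap tx rx out) := by unfold Spec_trim_to_overlap; infer_instance

-- ===== CLAIM =====
def Claim_equal_trim_to_overlap : Prop := ∀ (tx : List (String × Int)) (rx : List (String × Int)), Dom_trim_to_overlap tx rx → Pre_trim_to_overlap tx rx → Spec_trim_to_overlap tx rx (trim_to_overlap tx rx)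

-- ===== LEMMAS AND PROOFS =====

-- find? respects a predicate equal on the list's members
theorem pvFind?_congr {α : Type} (l : List α) (p q : α → Bool) (h : ∀ x ∈ l, p x = q x) :
    l.find? p = l.find? q := by
  induction l with
  | nil => rfl
  | cons x t ih =>
    simp only [List.find?]
    rw [h x (by simp)]
    cases q x
    · exact ih (fun y hy => h y (by simp [hy]))
    · rfl

-- the forward scan is the first enumerate match
theorem pvFirst_eq (keys : PySem.Set String) (pkts : List (String × Int)) (s : Int) :
    pvFirstIdx keys pkts s
      = ((PySem.List.enumerate pkts s).find? (fun ip => PySem.Set.contains keys ip.2.1)).map (fun ip => ip.1) := by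
  induction pkts generalizing s with
  | nil => simp [pvFirstIdx, PySem.List.enumerate_nil]
  | cons x t ih =>
    rw [PySem.List.enumerate_cons]
    by_cases h : x.1 ∈ keys
    · simp [pvFirstIdx, List.find?, h]
    · simp [pvFirstIdx, List.find?, h, ih]

-- the backward scan over the reversed list is the last enumerate match
theorem pvLast_eq (keys : PySem.Set String) (pkts : List (String × Int)) (s : Int) :
    pvLastIdx keys pkts.reverse (s + pkts.length - 1)
      = (((PySem.List.enumerate pkts s).filter (fun ip => PySem.Set.contains keys ip.2.1)).map (fun ip => ip.1)).getLast? := by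
  induction pkts using List.reverseRecOn generalizing s with
  | nil => simp [pvLastIdx, PySem.List.enumerate_nil]
  | append_singleton ys x ih =>
    rw [List.reverse_append, PySem.List.enumerate_append, PySem.List.enumerate_cons,
        PySem.List.enumerate_nil]
    simp only [List.reverse_cons, List.reverse_nil, List.nil_append, List.cons_append,
      List.filter_append, List.map_append, List.length_append, List.length_cons, List.length_nil,
      List.filter_cons, List.filter_nil]
    by_cases h : PySem.Set.contains keys x.1 = true
    · simp only [h, if_pos, pvLastIdx, List.map_cons, List.map_nil, List.getLast?_concat]
      congr 1
      push_cast
      ring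
    · simp only [Bool.not_eq_true] at h
      simp only [h, Bool.false_eq_true, if_false, List.map_nil, List.append_nil, pvLastIdx]
      rw [show s + ((ys.length + (0 + 1) : Nat) : Int) - 1 - 1 = s + (ys.length : Int) - 1 by push_cast; ring]
      exact ih s

-- max of a ≤-sorted nonempty Int list is its last element
theorem pvFoldlMax_getLast? (x : Int) (t : List Int) (h : List.Pairwise (· ≤ ·) (x :: t)) :
    some (t.foldl max x) = (x :: t).getLast? := by
  induction t generalizing x with
  | nil => simp
  | cons y t ih =>
    have hxy : x ≤ y := (List.pairwise_cons.mp h).1 y (by simp)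
    have h' : List.Pairwise (· ≤ ·) (y :: t) := (List.pairwise_cons.mp h).2
    simp only [List.foldl_cons, max_eq_right hxy, List.getLast?_cons_cons]
    exact ih y h'

theorem pvMax?_id_eq_getLast? (l : List Int) (h : List.Pairwise (· ≤ ·) l) :
    PySem.List.max? l (fun i => i) = l.getLast? := by
  cases l with
  | nil => simp [PySem.List.max?]
  | cons x t => rw [PySem.List.max?_id_cons, pvFoldlMax_getLast? x t h]

-- filtered indices are increasing
theorem pvFiltered_pairwise (p : Int × (String × Int) → Bool) (pkts : List (String × Int)) :
    List.Pairwise (· ≤ ·) (((PySem.List.enumerate pkts 0).filter p).map (fun ip => ip.1)) := by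
  have h1 := PySem.List.pairwise_lt_enumerate (xs := pkts) (s := 0)
  have h2 := List.Pairwise.filter (p := p) h1
  rw [List.pairwise_map]
  exact h2.imp (fun h => le_of_lt h)

-- every payload of a list is in that list's payload set
theorem pvMem_keys (self : List (String × Int)) (ip : Int × (String × Int))
    (hmem : ip ∈ PySem.List.enumerate self 0) :
    ip.2.1 ∈ PySem.Set.ofList (self.map (fun pt => pt.1)) := by
  obtain ⟨k, hk, hip⟩ := (PySem.List.mem_enumerate_iff _ _ _).mp hmem
  rw [PySem.Set.mem_ofList, hip]
  exact List.mem_map_of_mem (List.getElem_mem hk)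

-- on members of 'self', membership in S ∩ T reduces to membership in the other component
theorem pvPred_inter_left (S T : PySem.Set String) (self : List (String × Int))
    (hS : ∀ ip ∈ PySem.List.enumerate self 0, ip.2.1 ∈ S) :
    ∀ ip ∈ PySem.List.enumerate self 0,
      PySem.Set.contains (PySem.Set.inter S T) ip.2.1 = PySem.Set.contains T ip.2.1 := by
  intro ip hmem
  rw [Bool.eq_iff_iff, PySem.Set.contains_iff, PySem.Set.contains_iff, PySem.Set.mem_inter]
  exact ⟨fun h => h.2, fun h => ⟨hS ip hmem, h⟩⟩

theorem pvPred_inter_right (S T : PySem.Set String) (self : List (String × Int))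
    (hT : ∀ ip ∈ PySem.List.enumerate self 0, ip.2.1 ∈ T) :
    ∀ ip ∈ PySem.List.enumerate self 0,
      PySem.Set.contains (PySem.Set.inter S T) ip.2.1 = PySem.Set.contains S ip.2.1 := by
  intro ip hmem
  rw [Bool.eq_iff_iff, PySem.Set.contains_iff, PySem.Set.contains_iff, PySem.Set.mem_inter]
  exact ⟨fun h => h.1, fun h => ⟨h, hT ip hmem⟩⟩

theorem trim_to_overlap_spec : Claim_equal_trim_to_overlap := by
  intro tx rx _hdom hpre
  unfold Spec_trim_to_overlap
  obtain ⟨pt, hpt, hrxm⟩ := List.any_eq_true.mp hpre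
  set tx_keys := PySem.Set.ofList (tx.map (fun pt => pt.1)) with htk
  set rx_keys := PySem.Set.ofList (rx.map (fun pt => pt.1)) with hrk
  -- a common payload exists on both sides
  have hptr : pt.1 ∈ rx_keys := by rw [hrk, PySem.Set.mem_ofList]; simpa using hrxm
  obtain ⟨qt, hqt, hq1⟩ := List.mem_map.mp (show pt.1 ∈ rx.map (fun qt => qt.1) by simpa using hrxm)
  have hqtt : qt.1 ∈ tx_keys := by
    rw [htk, PySem.Set.mem_ofList, hq1]; exact List.mem_map_of_mem hpt
  -- the boundary scans succeed
  have hfind_tx : (((PySem.List.enumerate tx 0).find? (fun ip => PySem.Set.contains rx_keys ip.2.1))).isSome := by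
    rw [List.find?_isSome]
    obtain ⟨k, hk, hget⟩ := List.mem_iff_getElem.mp hpt
    exact ⟨((0 : Int) + k, tx[k]), (PySem.List.mem_enumerate_iff _ _ _).mpr ⟨k, hk, rfl⟩,
      by simp only [hget]; exact (PySem.Set.contains_iff _ _).mpr hptr⟩
  have hfind_rx : (((PySem.List.enumerate rx 0).find? (fun ip => PySem.Set.contains tx_keys ip.2.1))).isSome := by
    rw [List.find?_isSome]
    obtain ⟨k, hk, hget⟩ := List.mem_iff_getElem.mp hqt
    exact ⟨((0 : Int) + k, rx[k]), (PySem.List.mem_enumerate_iff _ _ _).mpr ⟨k, hk, rfl⟩,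
      by simp only [hget]; exact (PySem.Set.contains_iff _ _).mpr hqtt⟩
  have hfilt_tx : (((PySem.List.enumerate tx 0).filter (fun ip => PySem.Set.contains rx_keys ip.2.1)).map (fun ip => ip.1)) ≠ [] := by
    simp only [ne_eq, List.map_eq_nil_iff, List.filter_eq_nil_iff, not_forall]
    obtain ⟨k, hk, hget⟩ := List.mem_iff_getElem.mp hpt
    exact ⟨((0 : Int) + k, tx[k]), (PySem.List.mem_enumerate_iff _ _ _).mpr ⟨k, hk, rfl⟩,
      by simp only [hget]; simpa using (PySem.Set.contains_iff _ _).mpr hptr⟩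
  have hfilt_rx : (((PySem.List.enumerate rx 0).filter (fun ip => PySem.Set.contains tx_keys ip.2.1)).map (fun ip => ip.1)) ≠ [] := by
    simp only [ne_eq, List.map_eq_nil_iff, List.filter_eq_nil_iff, not_forall]
    obtain ⟨k, hk, hget⟩ := List.mem_iff_getElem.mp hqt
    exact ⟨((0 : Int) + k, rx[k]), (PySem.List.mem_enumerate_iff _ _ _).mpr ⟨k, hk, rfl⟩,
      by simp only [hget]; simpa using (PySem.Set.contains_iff _ _).mpr hqtt⟩
  obtain ⟨ft, hft⟩ := Option.isSome_iff_exists.mp hfind_tx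
  obtain ⟨fr, hfr⟩ := Option.isSome_iff_exists.mp hfind_rx
  obtain ⟨lt, hlt⟩ := Option.isSome_iff_exists.mp (List.getLast?_isSome.mpr hfilt_tx)
  obtain ⟨lr, hlr⟩ := Option.isSome_iff_exists.mp (List.getLast?_isSome.mpr hfilt_rx)
  -- rewrite both sides to the same four indices
  show trim_to_overlap tx rx = trim_to_overlap_alt tx rx
  rw [trim_to_overlap, trim_to_overlap_alt]
  simp only [← htk, ← hrk]
  rw [pvFind?_congr _ _ _ (pvPred_inter_left tx_keys rx_keys tx (pvMem_keys tx)),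
      pvFind?_congr _ _ _ (pvPred_inter_right tx_keys rx_keys rx (pvMem_keys rx)),
      List.filter_congr (pvPred_inter_left tx_keys rx_keys tx (pvMem_keys tx)),
      List.filter_congr (pvPred_inter_right tx_keys rx_keys rx (pvMem_keys rx))]
  rw [pvFirst_eq, pvFirst_eq, hft, hfr]
  have hlt' := pvLast_eq rx_keys tx 0
  have hlr' := pvLast_eq tx_keys rx 0
  rw [show (0 : Int) + tx.length - 1 = (tx.length : Int) - 1 by ring] at hlt'
  rw [show (0 : Int) + rx.length - 1 = (rx.length : Int) - 1 by ring] at hlr'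
  rw [hlt', hlr', hlt, hlr,
      pvMax?_id_eq_getLast? _ (pvFiltered_pairwise _ tx),
      pvMax?_id_eq_getLast? _ (pvFiltered_pairwise _ rx),
      hlt, hlr]
  rfl
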